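-- pv_equiv track=rewrite | github.com/geolyun/TIL | 프로그래머스/unrated/133502. 햄버거 만들기/햄버거 만들기.py | solution
-- ===== SOURCE A (Python) =====
-- def solution(ingredient):
--     answer = 0
--     ham = [1,2,3,1]
--     s = -1
--
--     while s < len(ingredient)-4:
--         s += 1
--         if ingredient[s:s+4] == ham:
--             del ingredient[s:s+4]
--             answer += 1
--             s = s-3
--
--     return answer
-- ===== SOURCE B (Python) =====
-- def solution(ingredient):
--     stack = []
--     answer = 0
--     for x in ingredient:
--         stack.append(x)
--         if stack[-4:] == [1, 2, 3, 1]: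
--             del stack[-4:]
--             answer += 1
--     return answer
-- ===== Notes on version B (the rewrite author's own statement) =====
-- stated objective: alternative
-- what changed: Replaced the delete-and-backtrack removal simulation (slice compare + del on the input list with the index stepped back after each removal) by a single left-to-right pass that pushes ingredients onto a stack and pops whenever the top four form a burger.
import Mathlib
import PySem

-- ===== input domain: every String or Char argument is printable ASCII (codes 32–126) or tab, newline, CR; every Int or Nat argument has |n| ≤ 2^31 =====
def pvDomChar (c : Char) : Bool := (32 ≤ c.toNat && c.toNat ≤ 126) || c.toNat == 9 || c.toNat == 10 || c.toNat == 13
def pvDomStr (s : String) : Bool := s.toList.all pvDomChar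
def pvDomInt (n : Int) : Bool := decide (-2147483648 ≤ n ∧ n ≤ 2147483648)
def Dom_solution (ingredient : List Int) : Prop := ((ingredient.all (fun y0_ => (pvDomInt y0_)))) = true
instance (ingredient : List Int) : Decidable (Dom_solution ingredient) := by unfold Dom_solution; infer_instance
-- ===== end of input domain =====

-- B replaces A's delete-and-backtrack removal simulation on the input list by a single
-- left-to-right pass with a stack (push each ingredient, pop a completed burger pattern);
-- A mutates its argument in place (del slices) while B does not — the equivalence proved
-- here is about the return value only.

-- ===== PORT A =====
def pvHam : List Int := [1, 2, 3, 1]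

-- `del l[a:b]` (Python slice deletion, clamped indices)
def pvDelSlice (l : List Int) (a b : Int) : List Int :=
  let i := PySem.List.clampIdx l.length a
  let j := PySem.List.clampIdx l.length b
  l.take i ++ l.drop (max i j)

-- the while-loop of A; the fuel only makes the recursion structural
-- (length + 6 is shown sufficient by lemma pvMain below)
def pvLoopA : Nat → List Int → Int → Int → Int
  | 0, _, _, ans => ans
  | fuel + 1, l, s, ans =>
    if s < (l.length : Int) - 4 then
      let t := s + 1
      if PySem.List.slice l (some t) (some (t + 4)) = pvHam then
        pvLoopA fuel (pvDelSlice l t (t + 4)) (t - 3) (ans + 1)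
      else
        pvLoopA fuel l t ans
    else ans

def solution (ingredient : List Int) : Int :=
  pvLoopA (ingredient.length + 6) ingredient (-1) 0

-- ===== PORT B =====
-- one step of B's for-loop: push x; if stack[-4:] == [1,2,3,1] then del stack[-4:], answer += 1
def pvStep (p : List Int × Int) (x : Int) : List Int × Int :=
  let st := p.1 ++ [x]
  if PySem.List.slice st (some (-4)) none = [1, 2, 3, 1] then
    (st.take (PySem.List.clampIdx st.length (-4)), p.2 + 1)
  else (st, p.2)

def solution_alt (ingredient : List Int) : Int :=
  (ingredient.foldl pvStep ([], 0)).2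

-- ===== PRECONDITION & SPEC =====
def Spec_solution (ingredient : List Int) (out : Int) : Prop := out = solution_alt ingredient
instance (ingredient : List Int) (out : Int) : Decidable (Spec_solution ingredient out) := by unfold Spec_solution; infer_instance

-- ===== CLAIM (what is proved, stated in full; the proofs are below) =====
def Claim_equal_solution : Prop := ∀ (ingredient : List Int), Dom_solution ingredient → Spec_solution ingredient (solution ingredient)

-- ===== LEMMAS AND PROOFS =====

-- an occurrence of the hamburger pattern at (Nat) position p
abbrev pvOcc (l : List Int) (p : Nat) : Prop := (l.drop p).take 4 = [1, 2, 3, 1]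

-- A's loop invariant: no occurrence starts at any position ≤ s
def pvInv (l : List Int) (s : Int) : Prop := ∀ p : Nat, (p : Int) ≤ s → ¬ pvOcc l p

lemma pvStep_take (l : List Int) (j : Nat) (c : Int) (hj : j < l.length) :
    pvStep (l.take j, c) l[j] =
      if 3 ≤ j ∧ pvOcc l (j - 3) then (l.take (j - 3), c + 1) else (l.take (j + 1), c) := by
  have hst : l.take j ++ [l[j]] = l.take (j + 1) := by
    rw [List.take_add_one, List.getElem?_eq_getElem hj]; rfl
  have hlen : (l.take (j + 1)).length = j + 1 := by
    rw [List.length_take]; omega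
  have hslice : PySem.List.slice (l.take (j + 1)) (some (-4)) none = (l.take (j + 1)).drop (j + 1 - 4) := by
    rw [PySem.List.slice_from_neg_ofNat _ 4 (by norm_num), hlen]
  have hclamp : PySem.List.clampIdx (l.take (j + 1)).length (-4) = j + 1 - 4 := by
    rw [hlen, PySem.List.clampIdx_neg_ofNat _ 4 (by norm_num)]
  simp only [pvStep, hst, hslice, hclamp]
  by_cases h3 : 3 ≤ j
  · have h4 : j + 1 - 4 = j - 3 := by omega
    have hdt : (l.take (j + 1)).drop (j - 3) = (l.drop (j - 3)).take 4 := by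
      rw [List.drop_take]; congr 1; omega
    rw [h4, hdt]
    by_cases ho : pvOcc l (j - 3)
    · rw [if_pos ho, if_pos ⟨h3, ho⟩, List.take_take,
          show min (j - 3) (j + 1) = j - 3 by omega]
    · rw [if_neg ho, if_neg (by tauto)]
  · have h4 : j + 1 - 4 = 0 := by omega
    rw [h4, List.drop_zero]
    rw [if_neg (by intro h; have := congrArg List.length h; simp [hlen] at this; omega),
        if_neg (by tauto)]

lemma pvAdv (l : List Int) (j : Nat) (c : Int) (h : j < 3 ∨ ¬ pvOcc l (j - 3)) :
    List.foldl pvStep (l.take j, c) (l.drop j) =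
      List.foldl pvStep (l.take (j + 1), c) (l.drop (j + 1)) := by
  by_cases hj : j < l.length
  · rw [List.drop_eq_getElem_cons hj, List.foldl_cons, pvStep_take l j c hj,
       if_neg (fun hc => h.elim (fun h' => absurd hc.1 (by omega)) (fun h' => h' hc.2))]
  · rw [List.drop_eq_nil_of_le (by omega), List.drop_eq_nil_of_le (by omega),
       List.take_of_length_le (by omega), List.take_of_length_le (by omega)]

lemma pvStep_snd (st : List Int) (c x : Int) :
    pvStep (st, c) x = ((pvStep (st, 0) x).1, c + (pvStep (st, 0) x).2) := by
  by_cases h : PySem.List.slice (st ++ [x]) (some (-4)) none = [1, 2, 3, 1] <;>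
    simp [pvStep, h]

lemma pvAddC (xs : List Int) : ∀ (st : List Int) (c : Int),
    List.foldl pvStep (st, c) xs =
      ((List.foldl pvStep (st, 0) xs).1, c + (List.foldl pvStep (st, 0) xs).2) := by
  induction xs with
  | nil => intro st c; simp
  | cons x xs ih =>
    intro st c
    simp only [List.foldl_cons]
    rw [pvStep_snd st c x, ih ((pvStep (st, 0) x).1) (c + (pvStep (st, 0) x).2),
        show pvStep (st, 0) x = ((pvStep (st, 0) x).1, (pvStep (st, 0) x).2) from rfl,
        ih ((pvStep (st, 0) x).1) ((pvStep (st, 0) x).2)]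
    simp [add_assoc]

lemma pvOccPrefix (l r : List Int) (p m : Nat) (hp : p + 4 ≤ m) (hm : m ≤ l.length) :
    pvOcc (l.take m ++ r) p ↔ pvOcc l p := by
  have key : ∀ x : List Int, (x.drop p).take 4 = (x.take (p + 4)).drop p := by
    intro x; rw [List.drop_take, show p + 4 - p = 4 by omega]
  have h1 : (l.take m ++ r).take (p + 4) = l.take (p + 4) := by
    rw [List.take_append_of_le_length (by rw [List.length_take]; omega), List.take_take,
        show min (p + 4) m = p + 4 by omega]
  unfold pvOcc
  rw [key, key, h1]

lemma pvCrit (l : List Int) (m : Nat) (h3 : 3 ≤ m) (hm : m + 4 ≤ l.length)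
    (hocc : pvOcc l m) (hno : ¬ pvOcc l (m - 3)) :
    ¬ pvOcc (l.take m ++ l.drop (m + 4)) (m - 3) := by
  intro h
  apply hno
  unfold pvOcc at h
  -- abbreviations
  have hA3len : ((l.drop (m - 3)).take 3).length = 3 := by
    rw [List.length_take, List.length_drop]; omega
  -- rewrite the drop of the glued list
  have hdrop : (l.take m ++ l.drop (m + 4)).drop (m - 3)
      = (l.drop (m - 3)).take 3 ++ l.drop (m + 4) := by
    rw [List.drop_append_of_le_length (by rw [List.length_take]; omega), List.drop_take,
        show m - (m - 3) = 3 by omega]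
  rw [hdrop] at h
  have htk : ((l.drop (m - 3)).take 3 ++ l.drop (m + 4)).take 4
      = (l.drop (m - 3)).take 3 ++ (l.drop (m + 4)).take 1 := by
    rw [List.take_append, List.take_take, hA3len,
        show min 4 3 = 3 by norm_num, show 4 - 3 = 1 by norm_num]
  rw [htk, show ([1, 2, 3, 1] : List Int) = [1, 2, 3] ++ [1] from rfl] at h
  have hsplit := List.append_inj h (by rw [hA3len]; rfl)
  -- head of l.drop m is 1
  have hhd : (l.drop m).take 1 = [1] := by
    have := congrArg (List.take 1) hocc
    rwa [List.take_take, show min 1 4 = 1 by norm_num] at this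
  -- l.drop (m+4) and l.drop m agree?  no: use hocc for the 4th element
  unfold pvOcc
  rw [show (4 : Nat) = 3 + 1 by norm_num, List.take_add, List.drop_drop,
      show m - 3 + 3 = m by omega, hsplit.1, hhd]
  rfl

lemma pvMatchBounds (l : List Int) (t : Int) (ht : -2 ≤ t)
    (h : PySem.List.slice l (some t) (some (t + 4)) = [1, 2, 3, 1]) :
    0 ≤ t ∧ t + 4 ≤ (l.length : Int) := by
  have hlen := congrArg List.length h
  rw [PySem.List.length_slice] at hlen
  simp only [PySem.List.clampIdx, List.length_cons, List.length_nil] at hlen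
  split_ifs at hlen <;> omega

lemma pvMatchIff (l : List Int) (t : Int) (ht : 0 ≤ t) :
    PySem.List.slice l (some t) (some (t + 4)) = [1, 2, 3, 1] ↔ pvOcc l t.toNat := by
  rw [PySem.List.slice_toNat l ht (by omega), show (t + 4).toNat - t.toNat = 4 by omega]

lemma pvRhsZero (l : List Int) (j : Nat) (h : l.length ≤ j) :
    (List.foldl pvStep (l.take j, 0) (l.drop j)).2 = 0 := by
  rw [List.drop_eq_nil_of_le h]; rfl

lemma pvMain : ∀ (fuel : Nat) (l : List Int) (s ans : Int),
    -3 ≤ s → (((l.length : Int) + 4 - s).toNat ≤ fuel) → pvInv l s →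
    pvLoopA fuel l s ans =
      ans + (List.foldl pvStep (l.take (s + 4).toNat, 0) (l.drop (s + 4).toNat)).2 := by
  intro fuel
  induction fuel with
  | zero =>
    intro l s ans hs hf _
    rw [show pvLoopA 0 l s ans = ans from rfl, pvRhsZero l _ (by omega)]; ring
  | succ fuel ih =>
    intro l s ans hs hf hinv
    simp only [pvLoopA]
    rw [show pvHam = [1, 2, 3, 1] from rfl]
    by_cases hcond : s < (l.length : Int) - 4
    · rw [if_pos hcond]
      by_cases hmatch : PySem.List.slice l (some (s + 1)) (some (s + 1 + 4)) = [1, 2, 3, 1]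
      · rw [if_pos hmatch]
        obtain ⟨ht0, ht4⟩ := pvMatchBounds l (s + 1) (by omega) hmatch
        set m := (s + 1).toNat with hm
        have hocc : pvOcc l m := (pvMatchIff l (s + 1) ht0).1 hmatch
        have hm4 : m + 4 ≤ l.length := by omega
        have hdel : pvDelSlice l (s + 1) (s + 1 + 4) = l.take m ++ l.drop (m + 4) := by
          unfold pvDelSlice
          rw [show (s + 1) = ((m : Nat) : Int) by omega,
              show (((m : Nat) : Int) + 4) = (((m + 4 : Nat)) : Int) by push_cast; ring,
              show (((m + 4 : Nat)) : Int) = ((m + 4 : Nat) : Int) from rfl]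
          simp only [PySem.List.clampIdx_natCast]
          rw [show min m l.length = m by omega, show min (m + 4) l.length = m + 4 by omega,
              show max m (m + 4) = m + 4 by omega]
        rw [hdel]
        set l' := l.take m ++ l.drop (m + 4) with hl'
        have hlen' : l'.length = l.length - 4 := by
          rw [hl', List.length_append, List.length_take, List.length_drop]; omega
        have hinv' : pvInv l' (s + 1 - 3) := by
          intro p hp
          by_cases hp4 : p + 4 ≤ m
          · rw [hl', pvOccPrefix l _ p m hp4 (by omega)]
            exact hinv p (by omega)
          · have hpm : p = m - 3 ∧ 3 ≤ m := by omega
            rw [hl', hpm.1]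
            exact pvCrit l m hpm.2 hm4 hocc (hinv (m - 3) (by omega))
        rw [ih l' (s + 1 - 3) (ans + 1) (by omega) (by omega) hinv']
        have h1 : (s + 4).toNat = m + 3 := by omega
        have h2 : (s + 1 - 3 + 4).toNat = m + 1 := by omega
        have hj : m + 3 < l.length := by omega
        rw [h1, h2, List.drop_eq_getElem_cons hj, List.foldl_cons, pvStep_take l (m + 3) 0 hj,
            if_pos ⟨by omega, by rwa [show m + 3 - 3 = m by omega]⟩,
            show m + 3 - 3 = m by omega]
        have e1 : l.take m = l'.take m :=
          (List.take_left' (by rw [List.length_take]; omega)).symm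
        have e2 : l.drop (m + 4) = l'.drop m :=
          (List.drop_left' (by rw [List.length_take]; omega)).symm
        have hadv : m < 3 ∨ ¬ pvOcc l' (m - 3) := by
          by_cases h3 : 3 ≤ m
          · exact Or.inr (hinv' (m - 3) (by omega))
          · exact Or.inl (by omega)
        rw [e1, e2, show (0 : Int) + 1 = 1 from rfl, pvAddC (l'.drop m) (l'.take m) 1,
            pvAdv l' m 0 hadv]
        show ans + 1 + _ = ans + (1 + _)
        ring
      · rw [if_neg hmatch]
        have hinv2 : pvInv l (s + 1) := by
          intro p hp
          by_cases hps : (p : Int) ≤ s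
          · exact hinv p hps
          · have hp0 : 0 ≤ s + 1 := by omega
            have hpe : p = (s + 1).toNat := by omega
            rw [hpe]
            exact fun ho => hmatch ((pvMatchIff l (s + 1) hp0).2 ho)
        rw [ih l (s + 1) ans (by omega) (by omega) hinv2]
        have hadv : (s + 4).toNat < 3 ∨ ¬ pvOcc l ((s + 4).toNat - 3) := by
          by_cases h0 : 0 ≤ s + 1
          · refine Or.inr ?_
            rw [show (s + 4).toNat - 3 = (s + 1).toNat by omega]
            exact fun ho => hmatch ((pvMatchIff l (s + 1) h0).2 ho)
          · exact Or.inl (by omega)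
        rw [show (s + 1 + 4).toNat = (s + 4).toNat + 1 by omega, ← pvAdv l ((s + 4).toNat) 0 hadv]
    · rw [if_neg hcond, pvRhsZero l _ (by omega)]; ring

-- ===== VERDICT (by name: the statement is the Claim_ definition above) =====
theorem solution_spec : Claim_equal_solution := by
  intro ingredient _
  unfold Spec_solution solution solution_alt
  rw [pvMain (ingredient.length + 6) ingredient (-1) 0 (by omega) (by omega)
      (fun p hp => absurd hp (by omega))]
  have h0 := pvAdv ingredient 0 0 (Or.inl (by norm_num))
  rw [pvAdv ingredient 1 0 (Or.inl (by norm_num)),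
      pvAdv ingredient 2 0 (Or.inl (by norm_num))] at h0
  simp only [List.take_zero, List.drop_zero] at h0
  rw [show ((-1 : Int) + 4).toNat = 3 from rfl, ← h0, zero_add]
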